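-- pv_equiv track=rewrite | github.com/lcsig/Sequence-Searcher | search_engine/seq_calc.py | seq_cumulative_sum
-- ===== SOURCE A (Python) =====
-- def seq_cumulative_sum(sequence: list, cumulative_sum_level: int):
--     """
--     A function to return the cumulative product
--     sequence: a list of integers that contains the sequence
--     cumulative_sum_level: An integer that indicates the cumulative product level
--     return: A list of list of integers that contains the sequence after applying cumulative sum operation
--     """
--     seq = sequence
--     list_ret = [[0]] * cumulative_sum_level
--
--     for idx in range(cumulative_sum_level):
--         sum_seq = [0] * (len(seq))
--         sum_seq[0] = seq[0]
--         for n in range(1, len(seq)):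
--             sum_seq[n] = sum_seq[n - 1] + seq[n]
--
--         list_ret[idx] = sum_seq
--         seq = sum_seq
--
--     return list_ret
-- ===== SOURCE B (Python) =====
-- def seq_cumulative_sum(sequence: list, cumulative_sum_level: int):
--     # One pass over the sequence: thread running sums across all levels per
--     # element instead of re-scanning the whole sequence once per level.
--     run = [0] * cumulative_sum_level
--     rows = [[] for _ in range(cumulative_sum_level)]
--     for x in sequence:
--         prev = x
--         new_run = []
--         for r in run:
--             prev = r + prev
--             new_run.append(prev)
--         run = new_run
--         for row, v in zip(rows, run):
--             row.append(v)
--     return rows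
-- ===== Notes on version B (the rewrite author's own statement) =====
-- stated objective: alternative
-- what changed: Single pass over the sequence threading a running sum per level through each element (loop interchange with incremental accumulators), instead of recomputing a full prefix-sum array once per level.
import Mathlib
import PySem

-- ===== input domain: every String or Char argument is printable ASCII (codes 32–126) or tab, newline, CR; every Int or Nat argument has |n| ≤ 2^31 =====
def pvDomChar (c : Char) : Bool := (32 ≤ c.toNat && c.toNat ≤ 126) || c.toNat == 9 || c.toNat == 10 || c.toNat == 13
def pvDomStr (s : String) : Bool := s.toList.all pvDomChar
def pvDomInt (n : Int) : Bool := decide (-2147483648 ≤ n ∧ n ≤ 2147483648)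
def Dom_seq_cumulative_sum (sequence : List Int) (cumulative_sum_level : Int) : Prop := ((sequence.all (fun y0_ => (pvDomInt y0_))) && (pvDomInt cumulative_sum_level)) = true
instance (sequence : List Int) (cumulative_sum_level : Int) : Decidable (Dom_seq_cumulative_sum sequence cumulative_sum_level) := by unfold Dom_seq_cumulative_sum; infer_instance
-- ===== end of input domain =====

-- B replaces A's one-prefix-sum-pass-per-level with a single pass over the sequence
-- threading a running sum per level (objective: alternative decomposition, same cost).

-- ===== PORT A =====
-- sum_seq is filled in place from index 0 upward, each cell from the previous
-- one; modeled as building the list by appending while carrying sum_seq[n-1].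
def pvCumsumA (seq : List Int) : List Int :=
  -- sum_seq[0] = seq[0]: headD 0 (Python raises IndexError on an empty seq; excluded by Pre_)
  ((PySem.List.pyRange 1 (seq.length : Int) 1).foldl
    (fun (st : List Int × Int) n =>
      let v := st.2 + seq.getD n.toNat 0   -- sum_seq[n] = sum_seq[n-1] + seq[n]; n in range
      (st.1 ++ [v], v)) ([seq.headD 0], seq.headD 0)).1

-- list_ret = [[0]] * level, then list_ret[idx] = sum_seq for idx = 0,1,...:
-- sequential in-order assignment modeled as an append-build; seq is rebound each round.
def seq_cumulative_sum (sequence : List Int) (cumulative_sum_level : Int) : List (List Int) :=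
  ((PySem.List.pyRange 0 cumulative_sum_level 1).foldl
    (fun (st : List (List Int) × List Int) _ =>
      let s := pvCumsumA st.2
      (st.1 ++ [s], s)) ([], sequence)).1

-- ===== PORT B =====
-- inner  'for r in run: prev = r + prev; new_run.append(prev)'
def pvColStep : List Int → Int → List Int
  | [], _ => []
  | r :: rs, prev => (r + prev) :: pvColStep rs (r + prev)

def seq_cumulative_sum_alt (sequence : List Int) (cumulative_sum_level : Int) : List (List Int) :=
  (sequence.foldl
    (fun (st : List Int × List (List Int)) x =>
      let newRun := pvColStep st.1 x
      (newRun, List.zipWith (fun row v => row ++ [v]) st.2 newRun))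
    (List.replicate cumulative_sum_level.toNat 0,      -- run = [0] * level
     List.replicate cumulative_sum_level.toNat [])).2  -- rows = [[] for _ in range(level)]

-- ===== PRECONDITION & SPEC =====
-- Pre_ excludes only the inputs on which A raises IndexError: an empty sequence
-- with a positive level (A reads seq[0] of the empty list there).
def Pre_seq_cumulative_sum (sequence : List Int) (cumulative_sum_level : Int) : Prop :=
  sequence ≠ [] ∨ cumulative_sum_level ≤ 0
instance (sequence : List Int) (cumulative_sum_level : Int) : Decidable (Pre_seq_cumulative_sum sequence cumulative_sum_level) := by unfold Pre_seq_cumulative_sum; infer_instance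

def pvWitness_seq_cumulative_sum : List Int × Int := ([1, 2, 3], 2)

def Spec_seq_cumulative_sum (sequence : List Int) (cumulative_sum_level : Int) (out : List (List Int)) : Prop := out = seq_cumulative_sum_alt sequence cumulative_sum_level
instance (sequence : List Int) (cumulative_sum_level : Int) (out : List (List Int)) : Decidable (Spec_seq_cumulative_sum sequence cumulative_sum_level out) := by unfold Spec_seq_cumulative_sum; infer_instance

-- ===== CLAIM (what is proved, stated in full; the proofs are below) =====
def Claim_equal_seq_cumulative_sum : Prop := ∀ (sequence : List Int) (cumulative_sum_level : Int), Dom_seq_cumulative_sum sequence cumulative_sum_level → Pre_seq_cumulative_sum sequence cumulative_sum_level → Spec_seq_cumulative_sum sequence cumulative_sum_level (seq_cumulative_sum sequence cumulative_sum_level)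

-- ===== LEMMAS AND PROOFS =====

-- Reference semantics: pvCsum a xs = prefix sums of xs shifted by a.
def pvCsum (a : Int) : List Int → List Int
  | [] => []
  | x :: t => (a + x) :: pvCsum (a + x) t

-- pvRows seq L = the L cumulative-sum rows; pvRuns seq L = last prefix sum of each row.
def pvRows (seq : List Int) : Nat → List (List Int)
  | 0 => []
  | L + 1 => pvCsum 0 seq :: pvRows (pvCsum 0 seq) L

def pvRuns (seq : List Int) : Nat → List Int
  | 0 => []
  | L + 1 => seq.sum :: pvRuns (pvCsum 0 seq) L

theorem pvCsum_append_singleton (p : List Int) : ∀ (a x : Int),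
    pvCsum a (p ++ [x]) = pvCsum a p ++ [a + p.sum + x] := by
  induction p with
  | nil => intro a x; simp [pvCsum]
  | cons h t ih =>
    intro a x
    simp only [List.cons_append, pvCsum, ih, List.sum_cons]
    have : a + h + t.sum + x = a + (h + t.sum) + x := by ring
    rw [this]

theorem pvCsum_length (a : Int) (p : List Int) : (pvCsum a p).length = p.length := by
  induction p generalizing a with
  | nil => rfl
  | cons h t ih => simp [pvCsum, ih]

theorem pvColStep_runs (L : Nat) : ∀ (p : List Int) (x : Int),
    pvColStep (pvRuns p L) x = pvRuns (p ++ [x]) L := by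
  induction L with
  | zero => intro p x; rfl
  | succ L ih =>
    intro p x
    simp only [pvRuns, pvColStep, List.sum_append, List.sum_cons, List.sum_nil, add_zero]
    congr 1
    rw [ih, pvCsum_append_singleton]
    simp

theorem pvZip_rows (L : Nat) : ∀ (p : List Int) (x : Int),
    List.zipWith (fun row v => row ++ [v]) (pvRows p L) (pvRuns (p ++ [x]) L)
      = pvRows (p ++ [x]) L := by
  induction L with
  | zero => intro p x; rfl
  | succ L ih =>
    intro p x
    simp only [pvRows, pvRuns, List.zipWith, List.sum_append, List.sum_cons, List.sum_nil,
      add_zero, pvCsum_append_singleton, zero_add]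
    congr 1
    exact ih (pvCsum 0 p) (p.sum + x)

theorem pvB_fold (L : Nat) : ∀ (rest p : List Int),
    rest.foldl
      (fun (st : List Int × List (List Int)) x =>
        let newRun := pvColStep st.1 x
        (newRun, List.zipWith (fun row v => row ++ [v]) st.2 newRun))
      (pvRuns p L, pvRows p L)
    = (pvRuns (p ++ rest) L, pvRows (p ++ rest) L) := by
  intro rest
  induction rest with
  | nil => intro p; simp
  | cons x rest ih =>
    intro p
    simp only [List.foldl_cons]
    rw [show (let newRun := pvColStep (pvRuns p L) x;
          (newRun, List.zipWith (fun row v => row ++ [v]) (pvRows p L) newRun))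
        = (pvRuns (p ++ [x]) L, pvRows (p ++ [x]) L) by
      simp only [pvColStep_runs]; exact congrArg _ (pvZip_rows L p x)]
    rw [ih (p ++ [x])]
    simp

theorem pvRuns_nil (L : Nat) : pvRuns [] L = List.replicate L 0 := by
  induction L with
  | zero => rfl
  | succ L ih => simp [pvRuns, pvCsum, List.replicate, ih]

theorem pvRows_nil (L : Nat) : pvRows [] L = List.replicate L [] := by
  induction L with
  | zero => rfl
  | succ L ih => simp [pvRows, pvCsum, List.replicate, ih]

theorem pvB_eq (sequence : List Int) (lvl : Int) :
    seq_cumulative_sum_alt sequence lvl = pvRows sequence lvl.toNat := by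
  unfold seq_cumulative_sum_alt
  rw [← pvRuns_nil lvl.toNat, ← pvRows_nil lvl.toNat, pvB_fold lvl.toNat sequence []]
  simp

-- The inner loop of A computes the tail of the prefix sums.
theorem pvA_inner (seq : List Int) : ∀ (d i : Nat) (pre : List Int) (v : Int),
    seq.length = i + d →
    ((PySem.List.pyRange (i : Int) (seq.length : Int) 1).foldl
      (fun (st : List Int × Int) n =>
        let v := st.2 + seq.getD n.toNat 0
        (st.1 ++ [v], v)) (pre, v)).1
    = pre ++ pvCsum v (seq.drop i) := by
  intro d
  induction d with
  | zero =>
    intro i pre v hlen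
    rw [PySem.List.pyRange_one_eq_nil (by omega)]
    have hd : seq.drop i = [] := List.drop_eq_nil_of_le (by omega)
    simp [hd, pvCsum]
  | succ d ih =>
    intro i pre v hlen
    have hi : i < seq.length := by omega
    rw [PySem.List.pyRange_one_cons (by exact_mod_cast hi)]
    simp only [List.foldl_cons]
    have hdrop : seq.drop i = seq[i] :: seq.drop (i + 1) := List.drop_eq_getElem_cons hi
    have hget : seq.getD ((i : Int)).toNat 0 = seq[i] := by
      simp [List.getD_eq_getElem?_getD, List.getElem?_eq_getElem hi]
    have : ((i : Int) + 1) = ((i + 1 : Nat) : Int) := by push_cast; ring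
    rw [this]
    rw [ih (i + 1) (pre ++ [v + seq.getD ((i : Int)).toNat 0]) (v + seq.getD ((i : Int)).toNat 0) (by omega)]
    rw [hdrop, hget]
    simp [pvCsum]

theorem pvCumsumA_eq (seq : List Int) (h : seq ≠ []) : pvCumsumA seq = pvCsum 0 seq := by
  cases seq with
  | nil => exact absurd rfl h
  | cons h0 t =>
    unfold pvCumsumA
    have hmain := pvA_inner (h0 :: t) t.length 1 [h0] h0 (by simp [List.length_cons]; omega)
    simp only [Nat.cast_one] at hmain
    show (List.foldl
        (fun (st : List Int × Int) n =>
          (st.1 ++ [st.2 + (h0 :: t).getD n.toNat 0], st.2 + (h0 :: t).getD n.toNat 0))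
        ([h0], h0) (PySem.List.pyRange 1 ((h0 :: t).length : Int) 1)).1 = pvCsum 0 (h0 :: t)
    rw [hmain]
    simp [pvCsum]

-- pvIter seq m = seq after m rounds of 'seq = sum_seq'.
def pvIter (seq : List Int) : Nat → List Int
  | 0 => seq
  | m + 1 => pvIter (pvCsum 0 seq) m

theorem pvCsum_ne_nil (a : Int) (seq : List Int) (h : seq ≠ []) : pvCsum a seq ≠ [] := by
  intro hc
  have := pvCsum_length a seq
  rw [hc] at this
  exact h (List.eq_nil_of_length_eq_zero this.symm)

theorem pvA_fold (l : List Int) : ∀ (acc : List (List Int)) (seq : List Int), seq ≠ [] →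
    l.foldl
      (fun (st : List (List Int) × List Int) _ =>
        let s := pvCumsumA st.2
        (st.1 ++ [s], s)) (acc, seq)
    = (acc ++ pvRows seq l.length, pvIter seq l.length) := by
  induction l with
  | nil => intro acc seq _; simp [pvRows, pvIter]
  | cons y l ih =>
    intro acc seq hne
    simp only [List.foldl_cons, List.length_cons]
    rw [show (let s := pvCumsumA seq; ((acc ++ [s], s) : List (List Int) × List Int))
        = (acc ++ [pvCsum 0 seq], pvCsum 0 seq) by simp [pvCumsumA_eq seq hne]]
    rw [ih (acc ++ [pvCsum 0 seq]) (pvCsum 0 seq) (pvCsum_ne_nil 0 seq hne)]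
    simp [pvRows, pvIter]

theorem pvA_eq (sequence : List Int) (lvl : Int)
    (hpre : sequence ≠ [] ∨ lvl ≤ 0) :
    seq_cumulative_sum sequence lvl = pvRows sequence lvl.toNat := by
  unfold seq_cumulative_sum
  rcases hpre with hne | hle
  · rw [pvA_fold _ [] sequence hne]
    simp [PySem.List.length_pyRange_one]
  · rw [PySem.List.pyRange_one_eq_nil (by omega)]
    have : lvl.toNat = 0 := by omega
    simp [this, pvRows]

-- ===== VERDICT (by name: the statement is the Claim_ definition above) =====
theorem seq_cumulative_sum_spec : Claim_equal_seq_cumulative_sum := by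
  intro sequence lvl _ hpre
  unfold Spec_seq_cumulative_sum
  rw [pvA_eq sequence lvl hpre, pvB_eq]
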